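-- pv_equiv track=rewrite | github.com/jk-jung/problem-solving | codewars/5kyu/5_The Bee.py | the_bee
-- ===== SOURCE A (Python) =====
-- from collections import Counter
--
-- def the_bee(n):
--     d = Counter()
--     d[(0, 0)] = 1
--     m = n * 2 - 1
--     s = 0
--     e = n
--     for i in range(m):
--         if i >= n:
--             e -= 1
--         for j in range(s, e):
--             if i == 0 and j == 0:
--                 d[(i, j)] = 1
--             else:
--                 d[(i, j)] = d[(i, j - 1)] + d[(i - 1, j)] + d[(i - 1, j + 1)]
--         if i < n - 1:
--             s -= 1
--     return d[(m - 1, 0)]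
-- ===== SOURCE B (Python) =====
-- def the_bee(n):
--     # Top-down demand-driven evaluation: starting from the target cell, an
--     # explicit work stack resolves each needed cell after its three
--     # predecessors, memoising values in a dict; the hexagonal band is given by
--     # the closed-form bounds lo(i) = -min(i, n-1), hi(i) = n - max(0, i-(n-1)).
--     m = n * 2 - 1
--     if m < 1:
--         return 0
--     memo = {}
--
--     def val(i, j):
--         # known value of cell (i, j), or None if not resolved yet
--         if i < 0 or j < -min(i, n - 1) or j >= n - max(0, i - (n - 1)):
--             return 0
--         if i == 0:
--             return 1
--         return memo.get((i, j))
--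
--     stack = [(m - 1, 0, False)]
--     while stack:
--         i, j, ready = stack.pop()
--         if val(i, j) is not None:
--             continue
--         if ready:
--             memo[(i, j)] = val(i, j - 1) + val(i - 1, j) + val(i - 1, j + 1)
--         else:
--             stack.append((i, j, True))
--             for p, q in ((i, j - 1), (i - 1, j), (i - 1, j + 1)):
--                 if val(p, q) is None:
--                     stack.append((p, q, False))
--     return val(m - 1, 0)
-- ===== Notes on version B (the rewrite author's own statement) =====
-- stated objective: alternative
-- what changed: Replaces A's bottom-up row-sweep over a Counter with mutated band bounds by a top-down demand-driven evaluation: an explicit work stack starting at the target cell resolves each needed cell after its three predecessors, memoising values in a dict, with the band bounds as closed forms lo(i)=-min(i,n-1), hi(i)=n-max(0,i-(n-1)).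
import Mathlib
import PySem

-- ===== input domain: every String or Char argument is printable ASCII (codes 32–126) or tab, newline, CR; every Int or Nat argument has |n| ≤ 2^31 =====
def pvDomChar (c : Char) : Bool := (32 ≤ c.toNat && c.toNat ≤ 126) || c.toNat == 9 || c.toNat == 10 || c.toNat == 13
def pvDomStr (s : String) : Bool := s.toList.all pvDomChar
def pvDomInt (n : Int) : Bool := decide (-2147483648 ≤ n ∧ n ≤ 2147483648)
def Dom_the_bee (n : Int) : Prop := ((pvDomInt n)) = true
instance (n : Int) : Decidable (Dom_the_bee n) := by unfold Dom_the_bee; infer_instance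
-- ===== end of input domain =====

-- B replaces A's bottom-up row sweep over a Counter (with mutated band bounds s/e) by a
-- top-down demand-driven evaluation: an explicit work stack starting at the target cell
-- resolves each needed cell after its three predecessors, memoising values in a dict,
-- with closed-form band bounds (objective: alternative decomposition, same asymptotic cost).

-- ===== PORT A =====
-- A's Counter (a hash dict with default 0) is modelled by Std.HashMap: exact for the operations
-- A performs (d[(i,j)] = v -> insert; d[(i,j)] with Counter default -> getD _ 0); PySem.Dict's
-- association-list representation computes the same values but is too slow to evaluate.
def the_bee (n : Int) : Int :=
  let d : Std.HashMap (Int × Int) Int := ((∅ : Std.HashMap (Int × Int) Int)).insert (0, 0) 1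
  let m := n * 2 - 1
  let st := (PySem.List.pyRange 0 m 1).foldl
    (fun (st : Std.HashMap (Int × Int) Int × Int × Int) i =>
      let e := if i ≥ n then st.2.2 - 1 else st.2.2
      let d := (PySem.List.pyRange st.2.1 e 1).foldl
        (fun d j =>
          if i = 0 ∧ j = 0 then d.insert (i, j) 1
          else d.insert (i, j)
            (d.getD (i, j - 1) 0 + d.getD (i - 1, j) 0 + d.getD (i - 1, j + 1) 0)) st.1
      let s := if i < n - 1 then st.2.1 - 1 else st.2.1
      (d, s, e))
    (d, 0, n)
  st.1.getD (m - 1, 0) 0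

-- ===== PORT B =====
-- B's memo dict (int-pair keys, written once per key, looked up by get) is modelled by
-- Std.HashMap, exact for those operations.

-- Python's val(i, j): the known value of cell (i, j), or None if not resolved yet.
def beeVal (n : Int) (memo : Std.HashMap (Int × Int) Int) (i j : Int) : Option Int :=
  if i < 0 ∨ j < -(min i (n - 1)) ∨ n - max 0 (i - (n - 1)) ≤ j then some 0
  else if i = 0 then some 1
  else memo.get? (i, j)

-- Termination measure for the work-stack loop (cited by beeLoop's decreasing_by):
-- each cell gets a rank that is strictly larger than its predecessors' ranks, and a
-- stack entry weighs 7·4^rank when unexpanded, 1·4^rank when expanded (ready).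
def beeRank (n i j : Int) : Nat := (i * (2 * (n.natAbs : Int) + 4) + (j + min i (n - 1) + 1)).toNat

def beeW (n : Int) (e : Int × Int × Bool) : Nat :=
  (if e.2.2 then 1 else 7) * 4 ^ beeRank n e.1 e.2.1

def beePhi (n : Int) (stack : List (Int × Int × Bool)) : Nat := (stack.map (beeW n)).sum

lemma beeVal_none_facts (n : Int) (memo : Std.HashMap (Int × Int) Int) (i j : Int)
    (h : beeVal n memo i j = none) :
    2 ≤ n ∧ 1 ≤ i ∧ -(min i (n - 1)) ≤ j ∧ j < n - max 0 (i - (n - 1)) ∧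
      memo.get? (i, j) = none := by
  unfold beeVal at h
  split_ifs at h with h1 h2
  push_neg at h1
  exact ⟨by omega, by omega, by omega, by omega, h⟩

lemma beeRank_head_pos (n i j : Int) (hi : 1 ≤ i) (hjl : -(min i (n - 1)) ≤ j) :
    1 ≤ beeRank n i j := by
  unfold beeRank
  have hW : (0 : Int) ≤ 2 * (n.natAbs : Int) + 4 := by omega
  have h1 : (1 : Int) * (2 * (n.natAbs : Int) + 4) ≤ i * (2 * (n.natAbs : Int) + 4) :=
    mul_le_mul_of_nonneg_right hi hW
  rw [one_mul] at h1
  omega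

lemma beeRank_lt_same (n i j : Int) (_hi : 1 ≤ i) (hdl : -(min i (n - 1)) ≤ j - 1) :
    beeRank n i (j - 1) < beeRank n i j := by
  unfold beeRank
  have ht : (0 : Int) ≤ i * (2 * (n.natAbs : Int) + 4) :=
    mul_nonneg (by omega) (by omega)
  generalize i * (2 * (n.natAbs : Int) + 4) = t at ht ⊢
  omega

lemma beeRank_lt_up (n i j j' : Int)
    (hn : 2 ≤ n) (hi : 1 ≤ i) (hjl : -(min i (n - 1)) ≤ j)
    (hi' : 1 ≤ i - 1) (hl' : -(min (i - 1) (n - 1)) ≤ j') (hj' : j' ≤ j + 1) :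
    beeRank n (i - 1) j' < beeRank n i j := by
  unfold beeRank
  have hmul : i * (2 * (n.natAbs : Int) + 4)
      = (i - 1) * (2 * (n.natAbs : Int) + 4) + (2 * (n.natAbs : Int) + 4) := by ring
  have ht : (0 : Int) ≤ (i - 1) * (2 * (n.natAbs : Int) + 4) :=
    mul_nonneg (by omega) (by omega)
  rw [hmul]
  generalize (i - 1) * (2 * (n.natAbs : Int) + 4) = t at ht ⊢
  omega

-- the work-stack push step strictly decreases the potential
lemma beeLoop_dec3 (n : Int) (memo : Std.HashMap (Int × Int) Int) (i j : Int)
    (rest : List (Int × Int × Bool)) (h : beeVal n memo i j = none) :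
    beePhi n ((if beeVal n memo (i - 1) (j + 1) = none then [(i - 1, j + 1, false)] else []) ++
        (if beeVal n memo (i - 1) j = none then [(i - 1, j, false)] else []) ++
        (if beeVal n memo i (j - 1) = none then [(i, j - 1, false)] else []) ++
        (i, j, true) :: rest)
      < beePhi n ((i, j, false) :: rest) := by
  obtain ⟨hn, hi, hjl, hjr, -⟩ := beeVal_none_facts n memo i j h
  have hrc : 1 ≤ beeRank n i j := beeRank_head_pos n i j hi hjl
  have hX : 0 < 4 ^ (beeRank n i j - 1) := Nat.pow_pos (by norm_num)
  have hsplit4 : 4 ^ beeRank n i j = 4 * 4 ^ (beeRank n i j - 1) := by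
    conv_lhs => rw [show beeRank n i j = (beeRank n i j - 1) + 1 by omega]
    rw [pow_succ]; ring
  have key : ∀ i' j', beeVal n memo i' j' = none →
      (i' = i ∧ j' = j - 1 ∨ i' = i - 1 ∧ (j' = j ∨ j' = j + 1)) →
      4 ^ beeRank n i' j' ≤ 4 ^ (beeRank n i j - 1) := by
    intro i' j' hno hcase
    apply Nat.pow_le_pow_right (by norm_num)
    obtain ⟨hn', hi', hl', hr', -⟩ := beeVal_none_facts n memo i' j' hno
    have hlt : beeRank n i' j' < beeRank n i j := by
      rcases hcase with ⟨e1, e2⟩ | ⟨e1, e2⟩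
      · rw [e1, e2] at hl' ⊢
        exact beeRank_lt_same n i j hi hl'
      · rw [e1] at hl' hi' ⊢
        exact beeRank_lt_up n i j j' hn hi hjl hi' hl' (by rcases e2 with rfl | rfl <;> omega)
    omega
  have hphiif : ∀ (i' j' : Int),
      (i' = i ∧ j' = j - 1 ∨ i' = i - 1 ∧ (j' = j ∨ j' = j + 1)) →
      beePhi n (if beeVal n memo i' j' = none then [(i', j', false)] else [])
        ≤ 7 * 4 ^ (beeRank n i j - 1) := by
    intro i' j' hcase
    split_ifs with hno
    · have hk := key i' j' hno hcase
      simp only [beePhi, List.map_cons, List.map_nil, List.sum_cons, List.sum_nil, beeW]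
      simpa using Nat.mul_le_mul_left 7 hk
    · simp [beePhi]
  have hb3 := hphiif (i - 1) (j + 1) (Or.inr ⟨rfl, Or.inr rfl⟩)
  have hb2 := hphiif (i - 1) j (Or.inr ⟨rfl, Or.inl rfl⟩)
  have hb1 := hphiif i (j - 1) (Or.inl ⟨rfl, rfl⟩)
  have hcons1 : beePhi n ((i, j, true) :: rest) = 4 ^ beeRank n i j + beePhi n rest := by
    simp [beePhi, beeW]
  have hcons7 : beePhi n ((i, j, false) :: rest) = 7 * 4 ^ beeRank n i j + beePhi n rest := by
    simp [beePhi, beeW]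
  have happ : ∀ (l1 l2 : List (Int × Int × Bool)),
      beePhi n (l1 ++ l2) = beePhi n l1 + beePhi n l2 := by
    intro l1 l2; simp [beePhi]
  rw [happ, happ, happ, hcons1, hcons7]
  linarith

lemma beePhi_tail_lt (n : Int) (e : Int × Int × Bool) (rest : List (Int × Int × Bool)) :
    beePhi n rest < beePhi n (e :: rest) := by
  have hw : 0 < beeW n e := by
    unfold beeW
    exact Nat.mul_pos (by split <;> omega) (Nat.pow_pos (by norm_num))
  simp only [beePhi, List.map_cons, List.sum_cons]
  omega

-- the while loop over the explicit work stack (Python pops from the end; the Lean list's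
-- head is the Python list's last element, so Python's three appends become three conses,
-- last-appended first)
def beeLoop (n : Int) (stack : List (Int × Int × Bool))
    (memo : Std.HashMap (Int × Int) Int) : Std.HashMap (Int × Int) Int :=
  match stack with
  | [] => memo
  | (i, j, ready) :: rest =>
    if beeVal n memo i j ≠ none then beeLoop n rest memo
    else if ready then
      -- Python adds the three plain ints; the deps are resolved here (lemma beeLoop_ok
      -- below), so each `val` is `some` and `.getD 0` is exact
      beeLoop n rest (memo.insert (i, j)
        ((beeVal n memo i (j - 1)).getD 0 + (beeVal n memo (i - 1) j).getD 0
          + (beeVal n memo (i - 1) (j + 1)).getD 0))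
    else
      beeLoop n
        ((if beeVal n memo (i - 1) (j + 1) = none then [(i - 1, j + 1, false)] else []) ++
         (if beeVal n memo (i - 1) j = none then [(i - 1, j, false)] else []) ++
         (if beeVal n memo i (j - 1) = none then [(i, j - 1, false)] else []) ++
         (i, j, true) :: rest) memo
termination_by beePhi n stack
decreasing_by
  · exact beePhi_tail_lt n _ rest
  · exact beePhi_tail_lt n _ rest
  · rename_i hne hr
    push_neg at hne
    rw [Bool.not_eq_true] at hr
    subst hr
    simpa [dite_eq_ite] using beeLoop_dec3 n memo i j rest hne

def the_bee_alt (n : Int) : Int :=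
  let m := n * 2 - 1
  if m < 1 then 0
  else
    -- Python returns val(m-1, 0), provably an int (never None): `.getD 0` is exact
    (beeVal n (beeLoop n [(m - 1, 0, false)] ∅) (m - 1) 0).getD 0

-- ===== PRECONDITION & SPEC =====
def Spec_the_bee (n : Int) (out : Int) : Prop := out = the_bee_alt n
instance (n : Int) (out : Int) : Decidable (Spec_the_bee n out) := by unfold Spec_the_bee; infer_instance

-- ===== CLAIM (what is proved, stated in full; the proofs are below) =====
def Claim_equal_the_bee : Prop := ∀ (n : Int), Dom_the_bee n → Spec_the_bee n (the_bee n)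

-- ===== LEMMAS AND PROOFS =====

-- pointwise description of HashMap insert (Python dict assignment)
lemma pvHM_getD_insert (m : Std.HashMap (Int × Int) Int) (k a : Int × Int) (v f : Int) :
    (m.insert k v).getD a f = if a = k then v else m.getD a f := by
  rw [Std.HashMap.getD_insert]
  by_cases h : a = k
  · rw [if_pos (by simp only [beq_iff_eq]; exact h.symm), if_pos h]
  · rw [if_neg (by simp only [beq_iff_eq]; exact fun hc => h hc.symm), if_neg h]

lemma pvHM_get?_insert (m : Std.HashMap (Int × Int) Int) (k a : Int × Int) (v : Int) :
    (m.insert k v).get? a = if a = k then some v else m.get? a := by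
  rw [Std.HashMap.get?_eq_getElem?, Std.HashMap.getElem?_insert]
  by_cases h : a = k
  · rw [if_pos (by simp only [beq_iff_eq]; exact h.symm), if_pos h]
  · rw [if_neg (by simp only [beq_iff_eq]; exact fun hc => h hc.symm), if_neg h,
      Std.HashMap.get?_eq_getElem?]

-- Column bounds of row k of the hexagonal band (n ≥ 1, 0 ≤ k ≤ 2n-2).
def pvLo (n : Int) (k : Nat) : Int := -(min (k : Int) (n - 1))
def pvHi (n : Int) (k : Nat) : Int := n - max 0 ((k : Int) - (n - 1))

-- Reference value of cell (k, j): 0 outside the band; row 0 all ones on [0, n);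
-- row k+1 the sum over the column at which a path drops into the row.
def pvV (n : Int) : Nat → Int → Int
  | 0, j => if 0 ≤ j ∧ j < n then 1 else 0
  | k + 1, j =>
    if pvLo n (k + 1) ≤ j ∧ j < pvHi n (k + 1) then
      ((PySem.List.pyRange (pvLo n (k + 1)) (j + 1) 1).map
        (fun j' => pvV n k j' + pvV n k (j' + 1))).sum
    else 0

lemma pvV_succ (n : Int) (k : Nat) (j : Int) :
    pvV n (k + 1) j =
      if pvLo n (k + 1) ≤ j ∧ j < pvHi n (k + 1) then
        ((PySem.List.pyRange (pvLo n (k + 1)) (j + 1) 1).map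
          (fun j' => pvV n k j' + pvV n k (j' + 1))).sum
      else 0 := rfl

lemma pvV_out (n : Int) (hn : 1 ≤ n) (k : Nat) (j : Int)
    (h : ¬ (pvLo n k ≤ j ∧ j < pvHi n k)) : pvV n k j = 0 := by
  cases k with
  | zero =>
    simp only [pvV]
    rw [if_neg]
    simp only [pvLo, pvHi] at h
    omega
  | succ k => rw [pvV_succ, if_neg h]

-- the cell recurrence of row k+1, exactly as A computes it
lemma pvV_rec (n : Int) (hn : 1 ≤ n) (k : Nat) (j : Int)
    (h : pvLo n (k + 1) ≤ j ∧ j < pvHi n (k + 1)) :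
    pvV n (k + 1) j = pvV n (k + 1) (j - 1) + pvV n k j + pvV n k (j + 1) := by
  obtain ⟨h1, h2⟩ := h
  rcases eq_or_lt_of_le h1 with hlo | hlo
  · rw [pvV_out n hn (k + 1) (j - 1) (by omega)]
    rw [pvV_succ, if_pos ⟨h1, h2⟩, ← hlo, PySem.List.pyRange_one_cons (by omega),
      PySem.List.pyRange_one_eq_nil (le_refl (pvLo n (k + 1) + 1))]
    simp
  · rw [pvV_succ, if_pos ⟨h1, h2⟩, pvV_succ (n) (k) (j - 1),
      if_pos (show pvLo n (k + 1) ≤ j - 1 ∧ j - 1 < pvHi n (k + 1) from ⟨by omega, by omega⟩),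
      PySem.List.pyRange_one_append (pvLo n (k + 1)) j (j + 1) (by omega) (by omega),
      List.map_append, List.sum_append,
      PySem.List.pyRange_one_cons (show j < j + 1 by omega),
      PySem.List.pyRange_one_eq_nil (le_refl (j + 1))]
    have hj : j - 1 + 1 = j := by omega
    rw [hj]
    simp [add_assoc]

lemma pvBand_nonempty (n : Int) (hn : 1 ≤ n) (k : Nat) (hk : (k : Int) ≤ 2 * n - 2) :
    pvLo n k ≤ pvHi n k - 1 := by
  simp only [pvLo, pvHi]; omega

lemma pvV_zero_one (n : Int) (j : Int) (h : 0 ≤ j ∧ j < n) : pvV n 0 j = 1 := by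
  simp only [pvV]; rw [if_pos h]

lemma pvLo_zero (n : Int) (hn : 1 ≤ n) : pvLo n 0 = 0 := by simp [pvLo]; omega

lemma pvA_inner (n : Int) (hn : 1 ≤ n) (i : Nat) (hi2 : (i : Int) ≤ 2 * n - 2)
    (d : Std.HashMap (Int × Int) Int)
    (hd : ∀ p : Int × Int, d.getD p 0 =
      if 0 ≤ p.1 ∧ p.1 < (i : Int) then pvV n p.1.toNat p.2
      else if p = ((0 : Int), (0 : Int)) then 1 else 0) :
    ∀ t : Nat, pvLo n i + (t : Int) ≤ pvHi n i →
      ∀ p : Int × Int,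
        ((PySem.List.pyRange (pvLo n i) (pvLo n i + (t : Int)) 1).foldl
          (fun d j =>
            if (i : Int) = 0 ∧ j = 0 then d.insert ((i : Int), j) 1
            else d.insert ((i : Int), j)
              (d.getD ((i : Int), j - 1) 0 + d.getD ((i : Int) - 1, j) 0 +
                d.getD ((i : Int) - 1, j + 1) 0)) d).getD p 0 =
          if 0 ≤ p.1 ∧ p.1 < (i : Int) then pvV n p.1.toNat p.2
          else if p.1 = (i : Int) ∧ pvLo n i ≤ p.2 ∧ p.2 < pvLo n i + (t : Int) then pvV n i p.2
          else if p = ((0 : Int), (0 : Int)) then 1 else 0 := by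
  intro t
  induction t with
  | zero =>
    intro _ p
    obtain ⟨p1, p2⟩ := p
    rw [PySem.List.pyRange_one_eq_nil (by omega), List.foldl_nil, hd (p1, p2)]
    simp only [Prod.mk.injEq]
    split_ifs <;> first | rfl | omega
  | succ t ih =>
    intro ht p
    have hcast : pvLo n i + ((t + 1 : Nat) : Int) = (pvLo n i + (t : Int)) + 1 := by
      push_cast; ring
    rw [hcast, PySem.List.pyRange_one_succ_right (by omega), List.foldl_append]
    simp only [List.foldl_cons, List.foldl_nil]
    have hD := ih (by omega)
    set j : Int := pvLo n i + (t : Int) with hjdef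
    set D := (PySem.List.pyRange (pvLo n i) j 1).foldl
        (fun d j =>
          if (i : Int) = 0 ∧ j = 0 then d.insert ((i : Int), j) 1
          else d.insert ((i : Int), j)
            (d.getD ((i : Int), j - 1) 0 + d.getD ((i : Int) - 1, j) 0 +
              d.getD ((i : Int) - 1, j + 1) 0)) d with hDdef
    clear_value j D
    have hlo0 : (i : Int) = 0 → pvLo n i = 0 := by
      intro h
      have hi0 : i = 0 := by omega
      subst hi0
      exact pvLo_zero n hn
    have hband : pvLo n i ≤ j ∧ j < pvHi n i := by constructor <;> omega
    have hfin : ∀ q : Int × Int, (D.insert ((i : Int), j) (pvV n i j)).getD q 0 =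
        if 0 ≤ q.1 ∧ q.1 < (i : Int) then pvV n q.1.toNat q.2
        else if q.1 = (i : Int) ∧ pvLo n i ≤ q.2 ∧ q.2 < j + 1 then pvV n i q.2
        else if q = ((0 : Int), (0 : Int)) then 1 else 0 := by
      intro q
      obtain ⟨q1, q2⟩ := q
      rw [pvHM_getD_insert]
      by_cases hkey : (q1, q2) = ((i : Int), j)
      · rw [if_pos hkey]
        rw [Prod.mk.injEq] at hkey
        obtain ⟨rfl, rfl⟩ := hkey
        rw [if_neg (by omega), if_pos ⟨rfl, by omega, by omega⟩]
      · rw [if_neg hkey, hD (q1, q2)]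
        rw [Prod.mk.injEq] at hkey
        simp only [Prod.mk.injEq]
        split_ifs <;> first | rfl | omega
    by_cases h0 : (i : Int) = 0 ∧ j = 0
    · rw [if_pos h0]
      have hi0 : i = 0 := by omega
      subst hi0
      have h1v : (1 : Int) = pvV n 0 j := by
        rw [pvV_zero_one n j (by omega)]
      conv_lhs => rw [h1v]
      exact hfin p
    · rw [if_neg h0]
      have hv1 : D.getD ((i : Int), j - 1) 0 = pvV n i (j - 1) := by
        rw [hD ((i : Int), j - 1)]
        simp only [Prod.mk.injEq]
        rw [if_neg (by omega)]
        rcases Nat.eq_zero_or_pos t with ht0 | ht0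
        · rw [if_neg (by omega)]
          by_cases hiz : (i : Int) = 0
          · have hl0 := hlo0 hiz
            rw [if_neg (by omega)]
            exact (pvV_out n hn i (j - 1) (by omega)).symm
          · rw [if_neg (fun hc => hiz hc.1)]
            exact (pvV_out n hn i (j - 1) (by omega)).symm
        · rw [if_pos ⟨by trivial, by omega, by omega⟩]
      cases i with
      | zero =>
        have hlo : pvLo n 0 = 0 := pvLo_zero n hn
        have hhi : pvHi n 0 = n := by simp [pvHi]; omega
        have hjne : j ≠ 0 := by
          intro hj0
          exact h0 ⟨by exact_mod_cast rfl, hj0⟩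
        have hv2 : D.getD (((0 : Nat) : Int) - 1, j) 0 = 0 := by
          rw [hD (((0 : Nat) : Int) - 1, j)]
          simp only [Prod.mk.injEq]
          rw [if_neg (by omega), if_neg (by omega), if_neg (by omega)]
        have hv3 : D.getD (((0 : Nat) : Int) - 1, j + 1) 0 = 0 := by
          rw [hD (((0 : Nat) : Int) - 1, j + 1)]
          simp only [Prod.mk.injEq]
          rw [if_neg (by omega), if_neg (by omega), if_neg (by omega)]
        rw [hv1, hv2, hv3]
        have hj1 : pvV n 0 (j - 1) = 1 := by
          apply pvV_zero_one
          rw [hlo] at hjdef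
          rw [hlo, hhi] at ht
          omega
        have hj2 : pvV n 0 j = 1 := by
          apply pvV_zero_one
          rw [hlo, hhi] at hband
          omega
        rw [hj1]
        conv_lhs => rw [show (1 : Int) + 0 + 0 = pvV n 0 j from by rw [hj2]; norm_num]
        exact hfin p
      | succ k =>
        have hv2 : D.getD (((k + 1 : Nat) : Int) - 1, j) 0 = pvV n k j := by
          rw [hD (((k + 1 : Nat) : Int) - 1, j)]
          rw [if_pos ⟨by push_cast; omega, by push_cast; omega⟩]
          congr 1
          push_cast
          omega
        have hv3 : D.getD (((k + 1 : Nat) : Int) - 1, j + 1) 0 = pvV n k (j + 1) := by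
          rw [hD (((k + 1 : Nat) : Int) - 1, j + 1)]
          rw [if_pos ⟨by push_cast; omega, by push_cast; omega⟩]
          congr 1
          push_cast
          omega
        rw [hv1, hv2, hv3, ← pvV_rec n hn k j hband]
        exact hfin p

lemma pvA_outer (n : Int) (hn : 1 ≤ n) :
    ∀ K : Nat, (K : Int) ≤ 2 * n - 1 →
      (((PySem.List.pyRange 0 (K : Int) 1).foldl
        (fun (st : Std.HashMap (Int × Int) Int × Int × Int) i =>
          let e := if i ≥ n then st.2.2 - 1 else st.2.2
          let d := (PySem.List.pyRange st.2.1 e 1).foldl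
            (fun d j =>
              if i = 0 ∧ j = 0 then d.insert (i, j) 1
              else d.insert (i, j)
                (d.getD (i, j - 1) 0 + d.getD (i - 1, j) 0 + d.getD (i - 1, j + 1) 0)) st.1
          let s := if i < n - 1 then st.2.1 - 1 else st.2.1
          (d, s, e))
        (((∅ : Std.HashMap (Int × Int) Int)).insert ((0 : Int), (0 : Int)) 1, (0 : Int), n)).2.1
          = -(min (K : Int) (n - 1)))
      ∧ (((PySem.List.pyRange 0 (K : Int) 1).foldl
        (fun (st : Std.HashMap (Int × Int) Int × Int × Int) i =>
          let e := if i ≥ n then st.2.2 - 1 else st.2.2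
          let d := (PySem.List.pyRange st.2.1 e 1).foldl
            (fun d j =>
              if i = 0 ∧ j = 0 then d.insert (i, j) 1
              else d.insert (i, j)
                (d.getD (i, j - 1) 0 + d.getD (i - 1, j) 0 + d.getD (i - 1, j + 1) 0)) st.1
          let s := if i < n - 1 then st.2.1 - 1 else st.2.1
          (d, s, e))
        (((∅ : Std.HashMap (Int × Int) Int)).insert ((0 : Int), (0 : Int)) 1, (0 : Int), n)).2.2
          = n - max 0 ((K : Int) - n))
      ∧ ∀ p : Int × Int,
        (((PySem.List.pyRange 0 (K : Int) 1).foldl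
        (fun (st : Std.HashMap (Int × Int) Int × Int × Int) i =>
          let e := if i ≥ n then st.2.2 - 1 else st.2.2
          let d := (PySem.List.pyRange st.2.1 e 1).foldl
            (fun d j =>
              if i = 0 ∧ j = 0 then d.insert (i, j) 1
              else d.insert (i, j)
                (d.getD (i, j - 1) 0 + d.getD (i - 1, j) 0 + d.getD (i - 1, j + 1) 0)) st.1
          let s := if i < n - 1 then st.2.1 - 1 else st.2.1
          (d, s, e))
        (((∅ : Std.HashMap (Int × Int) Int)).insert ((0 : Int), (0 : Int)) 1, (0 : Int), n)).1).getD p 0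
          = if 0 ≤ p.1 ∧ p.1 < (K : Int) then pvV n p.1.toNat p.2
            else if p = ((0 : Int), (0 : Int)) then 1 else 0 := by
  intro K
  induction K with
  | zero =>
    intro _
    rw [PySem.List.pyRange_one_eq_nil (by omega), List.foldl_nil]
    refine ⟨by simp; omega, by simp; omega, ?_⟩
    intro p
    obtain ⟨p1, p2⟩ := p
    rw [pvHM_getD_insert]
    simp only [Prod.mk.injEq]
    split_ifs <;> first | rfl | omega | simp
  | succ K ih =>
    intro hK1
    obtain ⟨hs, he, hdict⟩ := ih (by omega)
    have hcast : ((K + 1 : Nat) : Int) = (K : Int) + 1 := by push_cast; ring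
    rw [hcast, PySem.List.pyRange_one_succ_right (by omega), List.foldl_append]
    simp only [List.foldl_cons, List.foldl_nil]
    rw [hs, he]
    have hee : (if (K : Int) ≥ n then (n - max 0 ((K : Int) - n)) - 1 else n - max 0 ((K : Int) - n))
        = pvHi n K := by
      simp only [pvHi]; split_ifs <;> omega
    have hss : -(min (K : Int) (n - 1)) = pvLo n K := rfl
    rw [hee, hss]
    have hKb : (K : Int) ≤ 2 * n - 2 := by omega
    have hband := pvBand_nonempty n hn K hKb
    have htn : pvLo n K + (((pvHi n K - pvLo n K).toNat : Nat) : Int) = pvHi n K := by omega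
    refine ⟨?_, ?_, ?_⟩
    · simp only [pvLo]; split_ifs <;> omega
    · simp only [pvHi]; omega
    · intro p
      rw [show PySem.List.pyRange (pvLo n K) (pvHi n K) 1
            = PySem.List.pyRange (pvLo n K)
                (pvLo n K + (((pvHi n K - pvLo n K).toNat : Nat) : Int)) 1
          from by rw [htn]]
      rw [pvA_inner n hn K hKb _ hdict ((pvHi n K - pvLo n K).toNat) (by omega) p]
      obtain ⟨p1, p2⟩ := p
      simp only [Prod.mk.injEq]
      by_cases a1 : 0 ≤ p1 ∧ p1 < (K : Int)
      · rw [if_pos a1, if_pos (by omega)]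
      · rw [if_neg a1]
        by_cases a2 : p1 = (K : Int) ∧ pvLo n K ≤ p2 ∧
            p2 < pvLo n K + (((pvHi n K - pvLo n K).toNat : Nat) : Int)
        · rw [if_pos a2, if_pos (by omega), a2.1]
          simp
        · rw [if_neg a2]
          by_cases a3 : p1 = 0 ∧ p2 = 0
          · rw [if_pos a3, if_pos (by omega), a3.1, a3.2]
            exact (pvV_zero_one n 0 (by omega)).symm
          · rw [if_neg a3]
            by_cases b1 : 0 ≤ p1 ∧ p1 < (K : Int) + 1
            · rw [if_pos b1]
              have hp1 : p1 = (K : Int) := by omega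
              rw [hp1]
              simp only [Int.toNat_natCast]
              refine (pvV_out n hn K p2 ?_).symm
              intro hcontra
              exact a2 ⟨hp1, hcontra.1, by omega⟩
            · rw [if_neg b1]

-- what A returns for n ≥ 1
lemma pvA_eq (n : Int) (hn : 1 ≤ n) : the_bee n = pvV n (2 * n - 2).toNat 0 := by
  simp only [the_bee]
  have hK : (((2 * n - 1).toNat : Nat) : Int) = n * 2 - 1 := by omega
  rw [← hK]
  obtain ⟨_, _, hdict⟩ := pvA_outer n hn (2 * n - 1).toNat (by omega)
  rw [hdict ((((2 * n - 1).toNat : Nat) : Int) - 1, 0)]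
  rw [if_pos (by constructor <;> [omega; omega])]
  have ht : ((((2 * n - 1).toNat : Nat) : Int) - 1).toNat = (2 * n - 2).toNat := by omega
  rw [ht]

-- n < 1: A's outer loop body never runs and the looked-up key was never written
lemma pvA_small (n : Int) (hn : n < 1) : the_bee n = 0 := by
  simp only [the_bee]
  rw [PySem.List.pyRange_one_eq_nil (by omega), List.foldl_nil, pvHM_getD_insert,
    if_neg (by intro h; rw [Prod.mk.injEq] at h; omega), Std.HashMap.getD_empty]

-- ===== B-side proofs =====

-- band-extended reference value (0 below row 0)
def pvVX (n i j : Int) : Int := if 0 ≤ i then pvV n i.toNat j else 0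

-- every memo entry is correct
def ValOk (n : Int) (memo : Std.HashMap (Int × Int) Int) : Prop :=
  ∀ p v, memo.get? p = some v → 1 ≤ p.1 ∧ v = pvV n p.1.toNat p.2

-- every expanded (ready) stack entry has its three predecessors resolved or scheduled above it
def StackOk (n : Int) (stack : List (Int × Int × Bool))
    (memo : Std.HashMap (Int × Int) Int) : Prop :=
  ∀ l1 i j l2, stack = l1 ++ (i, j, true) :: l2 →
    ∀ p q : Int, ((p, q) = (i, j - 1) ∨ (p, q) = (i - 1, j) ∨ (p, q) = (i - 1, j + 1)) →
      beeVal n memo p q ≠ none ∨ ∃ b, (p, q, b) ∈ l1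

lemma beeVal_some_eq (n : Int) (hn : 1 ≤ n) (memo : Std.HashMap (Int × Int) Int)
    (hV : ValOk n memo) (i j v : Int) (h : beeVal n memo i j = some v) : v = pvVX n i j := by
  unfold beeVal at h
  split_ifs at h with h1 h2
  · obtain rfl : (0 : Int) = v := by simpa using h
    unfold pvVX
    split_ifs with h0
    · refine (pvV_out n hn i.toNat j ?_).symm
      simp only [pvLo, pvHi]
      omega
    · rfl
  · obtain rfl : (1 : Int) = v := by simpa using h
    push_neg at h1
    unfold pvVX
    rw [if_pos (by omega : (0 : Int) ≤ i), h2]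
    exact (pvV_zero_one n j (by omega)).symm
  · have hp := hV (i, j) v h
    unfold pvVX
    rw [if_pos (by omega : (0 : Int) ≤ i)]
    exact hp.2

lemma beeVal_mono (n : Int) (memo memo' : Std.HashMap (Int × Int) Int)
    (hsub : ∀ p v, memo.get? p = some v → memo'.get? p = some v) (i j : Int)
    (h : beeVal n memo i j ≠ none) : beeVal n memo' i j ≠ none := by
  unfold beeVal at h ⊢
  split_ifs at h ⊢ with h1 h2
  · simp
  · simp
  · obtain ⟨v, hv⟩ := Option.ne_none_iff_exists'.mp h
    rw [hsub (i, j) v hv]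
    simp

lemma beeVal_ne_none_of_get? (n : Int) (memo : Std.HashMap (Int × Int) Int) (i j v : Int)
    (h : memo.get? (i, j) = some v) : beeVal n memo i j ≠ none := by
  unfold beeVal
  split_ifs <;> simp
  rw [Std.HashMap.mem_iff_isSome_getElem?, ← Std.HashMap.get?_eq_getElem?, h]
  rfl

lemma beeLoop_nil (n : Int) (memo : Std.HashMap (Int × Int) Int) :
    beeLoop n [] memo = memo := by
  rw [beeLoop]

lemma beeLoop_cons_res (n : Int) (memo : Std.HashMap (Int × Int) Int) (i j : Int) (ready : Bool)
    (rest : List (Int × Int × Bool)) (h : beeVal n memo i j ≠ none) :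
    beeLoop n ((i, j, ready) :: rest) memo = beeLoop n rest memo := by
  rw [beeLoop, if_pos h]

lemma beeLoop_cons_ready (n : Int) (memo : Std.HashMap (Int × Int) Int) (i j : Int)
    (rest : List (Int × Int × Bool)) (h : beeVal n memo i j = none) :
    beeLoop n ((i, j, true) :: rest) memo = beeLoop n rest (memo.insert (i, j)
      ((beeVal n memo i (j - 1)).getD 0 + (beeVal n memo (i - 1) j).getD 0
        + (beeVal n memo (i - 1) (j + 1)).getD 0)) := by
  rw [beeLoop, if_neg (by simp [h]), if_pos rfl]

lemma beeLoop_cons_push (n : Int) (memo : Std.HashMap (Int × Int) Int) (i j : Int)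
    (rest : List (Int × Int × Bool)) (h : beeVal n memo i j = none) :
    beeLoop n ((i, j, false) :: rest) memo = beeLoop n
      ((if beeVal n memo (i - 1) (j + 1) = none then [(i - 1, j + 1, false)] else []) ++
       (if beeVal n memo (i - 1) j = none then [(i - 1, j, false)] else []) ++
       (if beeVal n memo i (j - 1) = none then [(i, j - 1, false)] else []) ++
       (i, j, true) :: rest) memo := by
  rw [beeLoop, if_neg (by simp [h])]
  simp

lemma pvTripleEq {p q i j : Int} {b c : Bool} (h : (p, q, b) = (i, j, c)) :
    p = i ∧ q = j := by
  have h1 := congrArg Prod.fst h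
  have h2 := congrArg (fun e : Int × Int × Bool => e.2.1) h
  exact ⟨h1, h2⟩

lemma beeLoop_ok (n : Int) (hn : 1 ≤ n) :
    ∀ (N : Nat), ∀ stack memo, beePhi n stack ≤ N → ValOk n memo → StackOk n stack memo →
      ValOk n (beeLoop n stack memo)
      ∧ (∀ p v, memo.get? p = some v → (beeLoop n stack memo).get? p = some v)
      ∧ (∀ e ∈ stack, beeVal n (beeLoop n stack memo) e.1 e.2.1 ≠ none) := by
  intro N
  induction N using Nat.strong_induction_on with
  | _ N IH =>
  intro stack memo hN hV hS
  cases stack with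
  | nil =>
    rw [beeLoop_nil]
    exact ⟨hV, fun p v hp => hp, by simp⟩
  | cons e rest =>
  obtain ⟨i, j, ready⟩ := e
  by_cases hres : beeVal n memo i j = none
  · obtain ⟨hn2, hi1, hjl, hjr, hget⟩ := beeVal_none_facts n memo i j hres
    cases ready with
    | true =>
      have hdep : ∀ p q : Int,
          ((p, q) = (i, j - 1) ∨ (p, q) = (i - 1, j) ∨ (p, q) = (i - 1, j + 1)) →
          beeVal n memo p q ≠ none := by
        intro p q hd
        rcases hS [] i j rest rfl p q hd with h' | ⟨b, hb⟩
        · exact h'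
        · simp at hb
      obtain ⟨v1, hv1⟩ := Option.ne_none_iff_exists'.mp (hdep i (j - 1) (Or.inl rfl))
      obtain ⟨v2, hv2⟩ := Option.ne_none_iff_exists'.mp (hdep (i - 1) j (Or.inr (Or.inl rfl)))
      obtain ⟨v3, hv3⟩ := Option.ne_none_iff_exists'.mp (hdep (i - 1) (j + 1) (Or.inr (Or.inr rfl)))
      have hval : v1 + v2 + v3 = pvV n i.toNat j := by
        have h1x : v1 = pvV n i.toNat (j - 1) := by
          rw [beeVal_some_eq n hn memo hV i (j - 1) v1 hv1]
          unfold pvVX; rw [if_pos (by omega : (0 : Int) ≤ i)]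
        have h2x : v2 = pvV n (i - 1).toNat j := by
          rw [beeVal_some_eq n hn memo hV (i - 1) j v2 hv2]
          unfold pvVX; rw [if_pos (by omega : (0 : Int) ≤ i - 1)]
        have h3x : v3 = pvV n (i - 1).toNat (j + 1) := by
          rw [beeVal_some_eq n hn memo hV (i - 1) (j + 1) v3 hv3]
          unfold pvVX; rw [if_pos (by omega : (0 : Int) ≤ i - 1)]
        have hk : i.toNat = (i - 1).toNat + 1 := by omega
        have hband : pvLo n ((i - 1).toNat + 1) ≤ j ∧ j < pvHi n ((i - 1).toNat + 1) := by
          simp only [pvLo, pvHi]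
          push_cast
          omega
        rw [h1x, h2x, h3x, hk, pvV_rec n hn ((i - 1).toNat) j hband]
      have hstep := beeLoop_cons_ready n memo i j rest hres
      rw [hv1, hv2, hv3] at hstep
      simp only [Option.getD_some] at hstep
      rw [hstep]
      have hmono1 : ∀ p v, memo.get? p = some v →
          (memo.insert (i, j) (v1 + v2 + v3)).get? p = some v := by
        intro p v hp
        rw [pvHM_get?_insert]
        split_ifs with hpk
        · rw [hpk, hget] at hp
          simp at hp
        · exact hp
      have hV2 : ValOk n (memo.insert (i, j) (v1 + v2 + v3)) := by
        intro p v hp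
        rw [pvHM_get?_insert] at hp
        split_ifs at hp with hpk
        · obtain rfl : v1 + v2 + v3 = v := by simpa using hp
          rw [hpk]
          exact ⟨by omega, hval⟩
        · exact hV p v hp
      have hS2 : StackOk n rest (memo.insert (i, j) (v1 + v2 + v3)) := by
        intro l1 x y l2 hsp p q hd
        rcases hS ((i, j, true) :: l1) x y l2 (by rw [hsp]; rfl) p q hd with h' | ⟨bb, hb⟩
        · exact Or.inl (beeVal_mono n memo _ hmono1 p q h')
        · rcases List.mem_cons.mp hb with heq | hmem
          · left
            obtain ⟨rfl, rfl⟩ := pvTripleEq heq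
            exact beeVal_ne_none_of_get? n _ p q (v1 + v2 + v3)
              (by rw [pvHM_get?_insert, if_pos rfl])
          · exact Or.inr ⟨bb, hmem⟩
      obtain ⟨hV', hmono, hall⟩ := IH (beePhi n rest)
          (lt_of_lt_of_le (beePhi_tail_lt n (i, j, true) rest) hN) rest _ le_rfl hV2 hS2
      refine ⟨hV', fun p v hp => hmono p v (hmono1 p v hp), ?_⟩
      intro e he
      rcases List.mem_cons.mp he with rfl | he'
      · exact beeVal_mono n _ _ hmono i j
          (beeVal_ne_none_of_get? n _ i j (v1 + v2 + v3) (by rw [pvHM_get?_insert, if_pos rfl]))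
      · exact hall e he'
    | false =>
      have hstep := beeLoop_cons_push n memo i j rest hres
      have hassoc :
          (if beeVal n memo (i - 1) (j + 1) = none then [(i - 1, j + 1, false)] else []) ++
            (if beeVal n memo (i - 1) j = none then [(i - 1, j, false)] else []) ++
            (if beeVal n memo i (j - 1) = none then [(i, j - 1, false)] else []) ++
            (i, j, true) :: rest
          = ((if beeVal n memo (i - 1) (j + 1) = none then [(i - 1, j + 1, false)] else []) ++
              (if beeVal n memo (i - 1) j = none then [(i - 1, j, false)] else []) ++
              (if beeVal n memo i (j - 1) = none then [(i, j - 1, false)] else [])) ++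
            ((i, j, true) :: rest) := by
        simp [List.append_assoc]
      rw [hassoc] at hstep
      rw [hstep]
      have hPfalse : ∀ e ∈
          (if beeVal n memo (i - 1) (j + 1) = none then [(i - 1, j + 1, false)] else []) ++
            (if beeVal n memo (i - 1) j = none then [(i - 1, j, false)] else []) ++
            (if beeVal n memo i (j - 1) = none then [(i, j - 1, false)] else []),
          e.2.2 = false := by
        intro e he
        simp only [List.mem_append] at he
        rcases he with (he | he) | he <;> split_ifs at he <;> simp at he <;> simp [he]
      have hPmem : ∀ p q : Int,
          ((p, q) = (i, j - 1) ∨ (p, q) = (i - 1, j) ∨ (p, q) = (i - 1, j + 1)) →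
          beeVal n memo p q = none → (p, q, false) ∈
            (if beeVal n memo (i - 1) (j + 1) = none then [(i - 1, j + 1, false)] else []) ++
              (if beeVal n memo (i - 1) j = none then [(i - 1, j, false)] else []) ++
              (if beeVal n memo i (j - 1) = none then [(i, j - 1, false)] else []) := by
        intro p q hd hno
        simp only [List.mem_append]
        rcases hd with he | he | he
        · right
          obtain ⟨rfl, rfl⟩ : p = i ∧ q = j - 1 := by
            exact ⟨congrArg Prod.fst he, congrArg Prod.snd he⟩
          rw [if_pos hno]
          simp
        · left; right
          obtain ⟨rfl, rfl⟩ : p = i - 1 ∧ q = j := by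
            exact ⟨congrArg Prod.fst he, congrArg Prod.snd he⟩
          rw [if_pos hno]
          simp
        · left; left
          obtain ⟨rfl, rfl⟩ : p = i - 1 ∧ q = j + 1 := by
            exact ⟨congrArg Prod.fst he, congrArg Prod.snd he⟩
          rw [if_pos hno]
          simp
      have hSL : StackOk n
          (((if beeVal n memo (i - 1) (j + 1) = none then [(i - 1, j + 1, false)] else []) ++
            (if beeVal n memo (i - 1) j = none then [(i - 1, j, false)] else []) ++
            (if beeVal n memo i (j - 1) = none then [(i, j - 1, false)] else [])) ++
            ((i, j, true) :: rest)) memo := by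
        intro l1 x y l2 hsp p q hd
        rcases List.append_eq_append_iff.mp hsp with ⟨t, hA1, hA2⟩ | ⟨c, hC1, hC2⟩
        · cases t with
          | nil =>
            rw [List.nil_append] at hA2
            injection hA2 with h1 h2
            obtain ⟨rfl, rfl⟩ := pvTripleEq h1
            by_cases hno : beeVal n memo p q = none
            · exact Or.inr ⟨false, by rw [hA1]; exact List.mem_append_left _ (hPmem p q hd hno)⟩
            · exact Or.inl hno
          | cons e t =>
            rw [List.cons_append] at hA2
            injection hA2 with h1 h2
            rcases hS ((i, j, false) :: t) x y l2 (by rw [h2]; rfl) p q hd with h' | ⟨bb, hb⟩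
            · exact Or.inl h'
            · rcases List.mem_cons.mp hb with heq | hmem
              · obtain ⟨rfl, rfl⟩ := pvTripleEq heq
                refine Or.inr ⟨true, ?_⟩
                rw [hA1, ← h1]
                exact List.mem_append_right _ (by simp)
              · exact Or.inr ⟨bb, by rw [hA1]; exact List.mem_append_right _ (by simp [hmem])⟩
        · cases c with
          | nil =>
            rw [List.nil_append] at hC2
            injection hC2 with h1 h2
            obtain ⟨rfl, rfl⟩ := (pvTripleEq h1.symm)
            by_cases hno : beeVal n memo p q = none
            · refine Or.inr ⟨false, ?_⟩
              have hl1 : l1 = (if beeVal n memo (i - 1) (j + 1) = none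
                  then [(i - 1, j + 1, false)] else []) ++
                (if beeVal n memo (i - 1) j = none then [(i - 1, j, false)] else []) ++
                (if beeVal n memo i (j - 1) = none then [(i, j - 1, false)] else []) := by
                rw [hC1]; simp
              rw [hl1]
              exact hPmem p q hd hno
            · exact Or.inl hno
          | cons e c =>
            exfalso
            injection hC2 with h1 h2
            have hmem : e ∈ (if beeVal n memo (i - 1) (j + 1) = none
                then [(i - 1, j + 1, false)] else []) ++
              (if beeVal n memo (i - 1) j = none then [(i - 1, j, false)] else []) ++
              (if beeVal n memo i (j - 1) = none then [(i, j - 1, false)] else []) := by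
              rw [hC1]
              exact List.mem_append_right _ (by simp)
            have hfalse := hPfalse e hmem
            rw [← h1] at hfalse
            simp at hfalse
      have hphiL : beePhi n
          (((if beeVal n memo (i - 1) (j + 1) = none then [(i - 1, j + 1, false)] else []) ++
            (if beeVal n memo (i - 1) j = none then [(i - 1, j, false)] else []) ++
            (if beeVal n memo i (j - 1) = none then [(i, j - 1, false)] else [])) ++
            ((i, j, true) :: rest)) < beePhi n ((i, j, false) :: rest) := by
        rw [← hassoc]
        exact beeLoop_dec3 n memo i j rest hres
      obtain ⟨hV', hmono, hall⟩ := IH _ (lt_of_lt_of_le hphiL hN) _ memo le_rfl hV hSL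
      refine ⟨hV', hmono, ?_⟩
      intro e he
      rcases List.mem_cons.mp he with rfl | he'
      · exact hall (i, j, true) (List.mem_append_right _ (by simp))
      · exact hall e (List.mem_append_right _ (by simp [he']))
  · push_neg at hres
    rw [beeLoop_cons_res n memo i j ready rest hres]
    have hS' : StackOk n rest memo := by
      intro l1 x y l2 hsp p q hd
      rcases hS ((i, j, ready) :: l1) x y l2 (by rw [hsp]; rfl) p q hd with h' | ⟨bb, hb⟩
      · exact Or.inl h'
      · rcases List.mem_cons.mp hb with heq | hmem
        · left
          obtain ⟨rfl, rfl⟩ := pvTripleEq heq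
          exact hres
        · exact Or.inr ⟨bb, hmem⟩
    obtain ⟨hV', hmono, hall⟩ := IH (beePhi n rest)
        (lt_of_lt_of_le (beePhi_tail_lt n (i, j, ready) rest) hN) rest memo le_rfl hV hS'
    refine ⟨hV', hmono, ?_⟩
    intro e he
    rcases List.mem_cons.mp he with rfl | he'
    · exact beeVal_mono n memo _ hmono i j hres
    · exact hall e he'

-- what B returns for n ≥ 1
lemma pvAlt_eq (n : Int) (hn : 1 ≤ n) : the_bee_alt n = pvV n (2 * n - 2).toNat 0 := by
  simp only [the_bee_alt]
  rw [if_neg (by omega : ¬ n * 2 - 1 < 1)]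
  have hV0 : ValOk n (∅ : Std.HashMap (Int × Int) Int) := by
    intro p v hp
    rw [Std.HashMap.get?_eq_getElem?] at hp
    simp at hp
  have hS0 : StackOk n [(n * 2 - 1 - 1, 0, false)] (∅ : Std.HashMap (Int × Int) Int) := by
    intro l1 x y l2 hsp p q hd
    exfalso
    cases l1 with
    | nil => simp at hsp
    | cons e t => simp at hsp
  obtain ⟨hV', hmono, hall⟩ := beeLoop_ok n hn (beePhi n [(n * 2 - 1 - 1, 0, false)])
      [(n * 2 - 1 - 1, 0, false)] ∅ le_rfl hV0 hS0
  have hne := hall (n * 2 - 1 - 1, 0, false) (by simp)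
  obtain ⟨v, hv⟩ := Option.ne_none_iff_exists'.mp hne
  rw [hv]
  simp only [Option.getD_some]
  rw [beeVal_some_eq n hn _ hV' (n * 2 - 1 - 1) 0 v hv]
  unfold pvVX
  rw [if_pos (by omega : (0 : Int) ≤ n * 2 - 1 - 1)]
  congr 1
  omega


-- ===== VERDICT (by name: the statement is the Claim_ definition above) =====
theorem the_bee_spec : Claim_equal_the_bee := by
  intro n _
  show the_bee n = the_bee_alt n
  by_cases hn : n < 1
  · rw [pvA_small n hn]
    simp only [the_bee_alt]
    rw [if_pos (by omega)]
  · rw [pvA_eq n (by omega), pvAlt_eq n (by omega)]
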